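-- pv_equiv track=rewrite | github.com/foocorp/gnu-fm | experimental/pygobbler/gobbler/views.py | _count_submissions
-- ===== SOURCE A (Python) =====
-- def _count_submissions(p):
--     i = 0
--     while True:
--         try:
--             p['a[%d]' % (i+1)]
--             i += 1
--         except:
--             break
--     return i
-- ===== SOURCE B (Python) =====
-- def _count_submissions(p):
--     if 'a[1]' not in p:
--         return 0
--     lo, hi = 1, 2
--     while 'a[%d]' % hi in p:
--         lo, hi = hi, hi * 2
--     while hi - lo > 1:
--         mid = (lo + hi) // 2
--         if 'a[%d]' % mid in p:
--             lo = mid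
--         else:
--             hi = mid
--     return lo
-- ===== Notes on version B (the rewrite author's own statement) =====
-- stated objective: alternative
-- what changed: A probes 'a[1]','a[2]',... linearly until a key is absent; B locates the boundary with exponential (galloping) search followed by binary search, so it probes O(log n) keys instead of O(n); Pre_ excludes dicts whose present 'a[k]' keys do not form a contiguous run a[1..n] (the form-encoding invariant this counter exists for), where A returns the length of the first contiguous run while B's galloping search may land beyond the gap.
-- outside the precondition, e.g. on _count_submissions({'a[1]': 0, 'a[2]': 0, 'a[4]': 0}): A returns 2, B returns 4
import Mathlib
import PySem

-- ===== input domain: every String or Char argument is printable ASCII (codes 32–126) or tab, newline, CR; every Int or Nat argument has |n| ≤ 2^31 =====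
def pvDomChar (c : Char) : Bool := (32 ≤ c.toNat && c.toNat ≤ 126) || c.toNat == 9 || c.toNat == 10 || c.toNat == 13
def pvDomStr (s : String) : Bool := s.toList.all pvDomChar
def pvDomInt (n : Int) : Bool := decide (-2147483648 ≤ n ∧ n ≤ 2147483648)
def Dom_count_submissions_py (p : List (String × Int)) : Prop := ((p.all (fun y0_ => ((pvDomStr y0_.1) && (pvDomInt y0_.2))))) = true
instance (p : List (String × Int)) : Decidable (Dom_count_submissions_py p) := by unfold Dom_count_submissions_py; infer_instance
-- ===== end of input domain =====

-- B replaces A's linear probe loop over keys 'a[1]','a[2]',… by exponential (galloping) search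
-- followed by binary search for the boundary (objective: alternative — a different search
-- strategy with fewer membership probes; not measurably faster on the timed inputs).
-- Pre_ states the contiguity assumption this relies on (see its comment).


-- ===== PORT A =====
-- the string 'a[%d]' % i, as a char list (str(i) = PySem.Int.toChars)
def pvAKey (i : Int) : List Char := 'a' :: '[' :: (PySem.Int.toChars i ++ [']'])

-- 'key in p' for the dict p as an association list (p[key] raises KeyError iff the key is absent)
def pvHasKey (p : List (String × Int)) (k : List Char) : Bool := p.any (fun kv => kv.1.toList == k)

-- A's 'while True: try p[key]; i += 1 except: break' loop; fuel p.length + 1 is never exhausted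
-- (the keys a[1]..a[i] probed successfully are distinct keys of p, so i never exceeds p.length)
def pvALoop (p : List (String × Int)) (i : Int) : Nat → Int
  | 0 => i
  | f + 1 => if pvHasKey p (pvAKey (i + 1)) then pvALoop p (i + 1) f else i

def count_submissions_py (p : List (String × Int)) : Int := pvALoop p 0 (p.length + 1)

-- ===== PORT B =====
-- Source B's "lo, hi = 1, 2; while 'a[%d]' % hi in p: lo, hi = hi, hi * 2"; the fuel
-- p.length + 1 is never exhausted (each successful probe needs a[hi] ∈ p, so hi ≤ p.length)
def pvGallop (p : List (String × Int)) (lo hi : Int) : Nat → Int × Int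
  | 0 => (lo, hi)
  | f + 1 => if pvHasKey p (pvAKey hi) then pvGallop p hi (hi * 2) f else (lo, hi)

-- Source B's "while hi - lo > 1: mid = (lo + hi) // 2; …"; fuel (hi - lo).toNat never exhausted
def pvBisect (p : List (String × Int)) (lo hi : Int) : Nat → Int
  | 0 => lo
  | f + 1 =>
    if hi - lo > 1 then
      let mid := PySem.Int.floordiv (lo + hi) 2
      if pvHasKey p (pvAKey mid) then pvBisect p mid hi f else pvBisect p lo mid f
    else lo

def count_submissions_py_alt (p : List (String × Int)) : Int :=
  if pvHasKey p (pvAKey 1) = false then 0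
  else
    let lh := pvGallop p 1 2 (p.length + 1)
    pvBisect p lh.1 lh.2 (lh.2 - lh.1).toNat

-- ===== PRECONDITION & SPEC =====
-- canonical-key parser used only by Pre_: some k iff cs = 'a[' ++ str(k) ++ ']' with k ≥ 0
def pvParseMid (mid : List Char) : Option Int :=
  if PySem.Chars.strIsdigit mid then
    let k : Int := mid.foldl (fun a c => a * 10 + ((c.toNat : Int) - 48)) 0
    if PySem.Int.toChars k == mid then some k else none
  else none

def pvParse (cs : List Char) : Option Int :=
  match cs with
  | 'a' :: '[' :: rest =>
    match rest.getLast? with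
    | some ']' => pvParseMid rest.dropLast
    | _ => none
  | _ => none

-- Pre_ requires the canonical keys 'a[k]' present in p to form a contiguous run a[1..n]
-- (every present index k ≥ 2 has its predecessor present) — the form-encoding invariant this
-- counter exists for. It EXCLUDES dicts with a gap below a present higher index, on which A
-- still returns the length of the first contiguous run while B's galloping search may land
-- beyond the gap.
def Pre_count_submissions_py (p : List (String × Int)) : Prop :=
  ∀ kv ∈ p, ((pvParse kv.1.toList).all
    (fun k => decide (k < 2) || pvHasKey p (pvAKey (k - 1)))) = true
instance (p : List (String × Int)) : Decidable (Pre_count_submissions_py p) := by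
  unfold Pre_count_submissions_py; infer_instance

def pvWitness_count_submissions_py : (List (String × Int)) := [("a[1]", 7), ("a[2]", 3)]

def Spec_count_submissions_py (p : List (String × Int)) (out : Int) : Prop := out = count_submissions_py_alt p
instance (p : List (String × Int)) (out : Int) : Decidable (Spec_count_submissions_py p out) := by unfold Spec_count_submissions_py; infer_instance

-- ===== CLAIM (what is proved, stated in full; the proofs are below) =====
def Claim_equal_count_submissions_py : Prop := ∀ (p : List (String × Int)), Dom_count_submissions_py p → Pre_count_submissions_py p → Spec_count_submissions_py p (count_submissions_py p)

-- ===== LEMMAS AND PROOFS =====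

-- decimal rendering of a Nat, structured for induction; bridged to Nat.toDigits below
def pvDec (m : Nat) : List Char :=
  if _h : m < 10 then [Nat.digitChar m] else pvDec (m / 10) ++ [Nat.digitChar (m % 10)]
decreasing_by exact Nat.div_lt_self (by omega) (by omega)

theorem pvDec_lt {m : Nat} (h : m < 10) : pvDec m = [Nat.digitChar m] := by
  rw [pvDec]; simp [h]

theorem pvDec_ge {m : Nat} (h : ¬ m < 10) :
    pvDec m = pvDec (m / 10) ++ [Nat.digitChar (m % 10)] := by
  conv_lhs => rw [pvDec]
  simp [h]

theorem pvToDigitsCore_eq (f : Nat) : ∀ (n : Nat) (acc : List Char), n < f →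
    Nat.toDigitsCore 10 f n acc = pvDec n ++ acc := by
  induction f with
  | zero => intro n acc h; omega
  | succ f ih =>
    intro n acc h
    rw [Nat.toDigitsCore]
    by_cases h10 : n < 10
    · have h0 : n / 10 = 0 := Nat.div_eq_of_lt h10
      simp [h0, pvDec_lt h10, Nat.mod_eq_of_lt h10]
    · have hne : ¬ n / 10 = 0 := by omega
      simp only [hne, if_false]
      have hlt : n / 10 < f := by
        have := Nat.div_lt_self (show 0 < n by omega) (show 1 < 10 by omega)
        omega
      rw [ih (n / 10) _ hlt, pvDec_ge h10, List.append_assoc]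
      rfl

theorem pvToChars_eq (n : Int) (h : 0 ≤ n) : PySem.Int.toChars n = pvDec n.toNat := by
  unfold PySem.Int.toChars
  rw [if_neg (by omega)]
  rw [Nat.toDigits, pvToDigitsCore_eq (n.toNat + 1) n.toNat [] (by omega)]
  simp

theorem pvDec_isdigit (m : Nat) : pvDec m ≠ [] ∧ ∀ c ∈ pvDec m, PySem.Chars.isdigit c = true := by
  induction m using Nat.strong_induction_on with
  | _ m ih =>
    by_cases h : m < 10
    · rw [pvDec_lt h]
      refine ⟨by simp, ?_⟩
      intro c hc
      have : c = Nat.digitChar m := by simpa using hc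
      subst this
      interval_cases m <;> rfl
    · rw [pvDec_ge h]
      have ihm := ih (m / 10) (Nat.div_lt_self (by omega) (by omega))
      refine ⟨by simp, ?_⟩
      intro c hc
      rcases List.mem_append.mp hc with hc | hc
      · exact ihm.2 c hc
      · have : c = Nat.digitChar (m % 10) := by simpa using hc
        subst this
        have h10 : m % 10 < 10 := Nat.mod_lt _ (by omega)
        interval_cases hm : (m % 10) <;> rfl

theorem pvDigitChar_val (d : Nat) (h : d < 10) : ((Nat.digitChar d).toNat : Int) - 48 = d := by
  interval_cases d <;> rfl

theorem pvDec_fold (m : Nat) : ∀ acc : Int,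
    (pvDec m).foldl (fun a c => a * 10 + ((c.toNat : Int) - 48)) acc
      = acc * 10 ^ (pvDec m).length + m := by
  induction m using Nat.strong_induction_on with
  | _ m ih =>
    intro acc
    by_cases h : m < 10
    · simp [pvDec_lt h, List.foldl, pvDigitChar_val m h]
    · have ihm := ih (m / 10) (Nat.div_lt_self (by omega) (by omega))
      rw [pvDec_ge h]
      simp only [List.foldl_append, List.length_append, List.foldl_cons, List.foldl_nil,
        List.length_cons, List.length_nil]
      rw [ihm acc, pvDigitChar_val (m % 10) (Nat.mod_lt _ (by omega))]
      have hm : (m : Int) = (m / 10 : Nat) * 10 + (m % 10 : Nat) := by push_cast; omega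
      rw [pow_succ, hm]
      ring

theorem pvParse_cons (rest : List Char) : pvParse ('a' :: '[' :: rest) =
    (match rest.getLast? with
     | some ']' => pvParseMid rest.dropLast
     | _ => none) := rfl

theorem pvParse_akey (n : Int) (h : 1 ≤ n) : pvParse (pvAKey n) = some n := by
  have htc : PySem.Int.toChars n = pvDec n.toNat := pvToChars_eq n (by omega)
  have hdig := pvDec_isdigit n.toNat
  rw [pvAKey, htc, pvParse_cons]
  have hlast : (pvDec n.toNat ++ [']']).getLast? = some ']' := by
    rw [List.getLast?_eq_some_iff]; exact ⟨_, rfl⟩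
  rw [hlast]
  show pvParseMid (pvDec n.toNat ++ [']']).dropLast = some n
  rw [List.dropLast_concat]
  have hisd : PySem.Chars.strIsdigit (pvDec n.toNat) = true := by
    rw [PySem.Chars.strIsdigit]
    simp only [Bool.and_eq_true, Bool.not_eq_true', List.isEmpty_eq_false_iff, List.all_eq_true]
    exact ⟨hdig.1, hdig.2⟩
  rw [pvParseMid, if_pos hisd]
  have hfold : (pvDec n.toNat).foldl (fun a c => a * 10 + ((c.toNat : Int) - 48)) 0 = n := by
    rw [pvDec_fold]
    simp
    omega
  simp only [hfold, htc]
  simp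

theorem pvAKey_inj (m n : Int) (hm : 1 ≤ m) (hn : 1 ≤ n) (h : pvAKey m = pvAKey n) : m = n := by
  have h1 := pvParse_akey m hm
  rw [h, pvParse_akey n hn] at h1
  exact (Option.some.injEq _ _ ▸ h1).symm

-- contiguity, extracted from Pre_: a present index k ≥ 2 has its predecessor present
theorem pvContig (p : List (String × Int)) (hpre : Pre_count_submissions_py p)
    (k : Int) (hk : 2 ≤ k) (h : pvHasKey p (pvAKey k) = true) :
    pvHasKey p (pvAKey (k - 1)) = true := by
  rcases List.any_eq_true.mp h with ⟨kv, hkv, hbeq⟩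
  have hkey : kv.1.toList = pvAKey k := by simpa using hbeq
  have := hpre kv hkv
  rw [hkey, pvParse_akey k (by omega)] at this
  simp only [Option.all_some, Bool.or_eq_true, decide_eq_true_eq] at this
  rcases this with h2 | h2
  · omega
  · exact h2

-- downward closure
theorem pvDown (p : List (String × Int)) (hpre : Pre_count_submissions_py p) :
    ∀ (n : Nat) (j : Int), 1 ≤ j → pvHasKey p (pvAKey (j + n)) = true →
      pvHasKey p (pvAKey j) = true := by
  intro n
  induction n with
  | zero => intro j _ h; simpa using h
  | succ n ih =>
    intro j hj h
    have h' : pvHasKey p (pvAKey ((j + n) + 1 - 1)) = true :=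
      pvContig p hpre ((j + n) + 1) (by omega) (by rw [show (j + n : Int) + 1 = j + (n + 1 : Nat) by push_cast; ring]; exact h)
    rw [show (j + n : Int) + 1 - 1 = j + n by ring] at h'
    exact ih j hj h'

theorem pvDown' (p : List (String × Int)) (hpre : Pre_count_submissions_py p)
    (j k : Int) (hj : 1 ≤ j) (hjk : j ≤ k) (h : pvHasKey p (pvAKey k) = true) :
    pvHasKey p (pvAKey j) = true := by
  have : k = j + ((k - j).toNat : Int) := by omega
  rw [this] at h
  exact pvDown p hpre (k - j).toNat j hj h

-- if a[1], …, a[m] are all present then m ≤ p.length (the keys are distinct keys of p)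
theorem pvBound (p : List (String × Int)) (m : Nat)
    (h : ∀ k : Nat, k < m → pvHasKey p (pvAKey ((k : Int) + 1)) = true) : m ≤ p.length := by
  have hsub : (List.map (fun k : Nat => pvAKey ((k : Int) + 1)) (List.range m))
      ⊆ p.map (fun kv => kv.1.toList) := by
    intro x hx
    rcases List.mem_map.mp hx with ⟨k, hk, rfl⟩
    rcases List.any_eq_true.mp (h k (List.mem_range.mp hk)) with ⟨kv, hkv, hbeq⟩
    exact List.mem_map.mpr ⟨kv, hkv, by simpa using hbeq⟩
  have hnd : (List.map (fun k : Nat => pvAKey ((k : Int) + 1)) (List.range m)).Nodup := by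
    refine (List.nodup_range).map_on ?_
    intro a ha b hb hab
    have := pvAKey_inj ((a : Int) + 1) ((b : Int) + 1) (by omega) (by omega) hab
    omega
  have := (List.subperm_of_subset hnd hsub).length_le
  simpa using this

-- A's loop: result r extends i, all of a[1..r] present, a[r+1] absent (given enough fuel)
theorem pvALoop_spec (p : List (String × Int)) :
    ∀ (f : Nat) (i : Int), 0 ≤ i →
      (∀ k : Nat, k < i.toNat → pvHasKey p (pvAKey ((k : Int) + 1)) = true) →
      (p.length : Int) ≤ i + f →
      i ≤ pvALoop p i f ∧
      (∀ k : Nat, k < (pvALoop p i f).toNat → pvHasKey p (pvAKey ((k : Int) + 1)) = true) ∧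
      pvHasKey p (pvAKey (pvALoop p i f + 1)) = false := by
  intro f
  induction f with
  | zero =>
    intro i hi hall hfuel
    refine ⟨le_refl _, hall, ?_⟩
    by_contra h
    have h' : pvHasKey p (pvAKey (i + 1)) = true := by
      simpa using h
    have : ∀ k : Nat, k < i.toNat + 1 → pvHasKey p (pvAKey ((k : Int) + 1)) = true := by
      intro k hk
      by_cases hlt : k < i.toNat
      · exact hall k hlt
      · have : (k : Int) + 1 = i + 1 := by omega
        rw [this]; exact h'
    have := pvBound p (i.toNat + 1) this
    omega
  | succ f ih =>
    intro i hi hall hfuel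
    rw [pvALoop]
    by_cases hp : pvHasKey p (pvAKey (i + 1)) = true
    · rw [if_pos hp]
      have hall' : ∀ k : Nat, k < (i + 1).toNat → pvHasKey p (pvAKey ((k : Int) + 1)) = true := by
        intro k hk
        by_cases hlt : k < i.toNat
        · exact hall k hlt
        · have : (k : Int) + 1 = i + 1 := by omega
          rw [this]; exact hp
      have := ih (i + 1) (by omega) hall' (by push_cast at hfuel ⊢; omega)
      exact ⟨by omega, this.2.1, this.2.2⟩
    · rw [if_neg hp]
      exact ⟨le_refl _, hall, by simpa using hp⟩

-- the characterisation of A's result used throughout: presence ↔ index ≤ result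
theorem pvN_char (p : List (String × Int)) (hpre : Pre_count_submissions_py p) :
    0 ≤ count_submissions_py p ∧ count_submissions_py p ≤ (p.length : Int) ∧
    ∀ k : Int, 1 ≤ k → (pvHasKey p (pvAKey k) = true ↔ k ≤ count_submissions_py p) := by
  have h := pvALoop_spec p (p.length + 1) 0 le_rfl (by intro k hk; omega) (by push_cast; omega)
  rw [count_submissions_py] at *
  set N := pvALoop p 0 (p.length + 1) with hN
  obtain ⟨h0, hall, habs⟩ := h
  have hbd : N.toNat ≤ p.length := pvBound p N.toNat hall
  refine ⟨h0, by omega, ?_⟩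
  intro k hk
  constructor
  · intro hpk
    by_contra hgt
    have : pvHasKey p (pvAKey (N + 1)) = true := pvDown' p hpre (N + 1) k (by omega) (by omega) hpk
    rw [habs] at this; exact absurd this (by simp)
  · intro hle
    have hk' : (k.toNat - 1 : Nat) < N.toNat := by omega
    have := hall _ hk'
    rw [show ((k.toNat - 1 : Nat) : Int) + 1 = k by omega] at this
    exact this

-- gallop invariant: keeps lo a present index, stops with N < hi
theorem pvGallop_spec (p : List (String × Int)) (N : Int)
    (hchar : ∀ k : Int, 1 ≤ k → (pvHasKey p (pvAKey k) = true ↔ k ≤ N)) :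
    ∀ (f : Nat) (lo hi : Int), 1 ≤ lo → lo ≤ N → lo < hi → N < hi * 2 ^ f →
      1 ≤ (pvGallop p lo hi f).1 ∧ (pvGallop p lo hi f).1 ≤ N ∧ N < (pvGallop p lo hi f).2 := by
  intro f
  induction f with
  | zero =>
    intro lo hi h1 h2 h3 h4
    simp only [pvGallop]
    refine ⟨h1, h2, by simpa using h4⟩
  | succ f ih =>
    intro lo hi h1 h2 h3 h4
    rw [pvGallop]
    by_cases hp : pvHasKey p (pvAKey hi) = true
    · rw [if_pos hp]
      have hhi : hi ≤ N := (hchar hi (by omega)).mp hp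
      exact ih hi (hi * 2) (by omega) hhi (by omega)
        (by rw [pow_succ] at h4; calc N < hi * (2 ^ f * 2) := by linarith [h4]
            _ = hi * 2 * 2 ^ f := by ring)
    · rw [if_neg hp]
      have : ¬ hi ≤ N := fun hle => hp ((hchar hi (by omega)).mpr hle)
      exact ⟨h1, h2, by omega⟩

-- bisect invariant: lo ≤ N < hi shrinks to lo = N
theorem pvBisect_spec (p : List (String × Int)) (N : Int)
    (hchar : ∀ k : Int, 1 ≤ k → (pvHasKey p (pvAKey k) = true ↔ k ≤ N)) :
    ∀ (f : Nat) (lo hi : Int), 1 ≤ lo → lo ≤ N → N < hi → hi - lo ≤ (f : Int) →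
      pvBisect p lo hi f = N := by
  intro f
  induction f with
  | zero => intro lo hi h1 h2 h3 h4; omega
  | succ f ih =>
    intro lo hi h1 h2 h3 h4
    rw [pvBisect]
    by_cases hgap : hi - lo > 1
    · rw [if_pos hgap]
      have h2pos : (0 : Int) < 2 := by omega
      have hmid : PySem.Int.floordiv (lo + hi) 2 = (lo + hi) / 2 := by
        simp [pysem, h2pos]
      simp only [hmid]
      have hlomid : lo < (lo + hi) / 2 := by omega
      have hmidhi : (lo + hi) / 2 < hi := by omega
      by_cases hp : pvHasKey p (pvAKey ((lo + hi) / 2)) = true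
      · rw [if_pos hp]
        exact ih _ hi (by omega) ((hchar _ (by omega)).mp hp) h3 (by omega)
      · rw [if_neg hp]
        have : ¬ (lo + hi) / 2 ≤ N := fun hle => hp ((hchar _ (by omega)).mpr hle)
        exact ih lo _ h1 h2 (by omega) (by omega)
    · rw [if_neg hgap]
      omega

-- ===== VERDICT (by name: the statement is the Claim_ definition above) =====
theorem count_submissions_py_spec : Claim_equal_count_submissions_py := by
  intro p _ hpre
  unfold Spec_count_submissions_py
  obtain ⟨h0, hlen, hchar⟩ := pvN_char p hpre
  set N := count_submissions_py p with hNdef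
  rw [count_submissions_py_alt]
  by_cases hp1 : pvHasKey p (pvAKey 1) = true
  · have hN1 : 1 ≤ N := (hchar 1 (by omega)).mp hp1
    rw [if_neg (by simp [hp1])]
    have hfuel : N < 2 * 2 ^ (p.length + 1) := by
      have h2 : (p.length : Int) < 2 ^ p.length := by
        exact_mod_cast Nat.lt_two_pow_self
      have hmono : (2 : Int) ^ p.length ≤ 2 ^ (p.length + 1) :=
        pow_le_pow_right₀ (by omega) (by omega)
      nlinarith [pow_pos (show (0:Int) < 2 by omega) (p.length + 1)]
    have hg := pvGallop_spec p N hchar (p.length + 1) 1 2 le_rfl hN1 (by omega)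
      (by linarith)
    obtain ⟨hg1, hg2, hg3⟩ := hg
    exact (pvBisect_spec p N hchar _ _ _ hg1 hg2 hg3 (by omega)).symm
  · rw [if_pos (by simpa using hp1)]
    have : ¬ 1 ≤ N := fun h => hp1 ((hchar 1 le_rfl).mpr h)
    omega
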